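-- pv_equiv track=rewrite | github.com/abotas/integrityeval | human_review.py | find_common_parts
-- ===== SOURCE A (Python) =====
-- from typing import List, Optional, Dict, Any
--
-- def find_common_parts(contexts: Dict[str, str]) -> tuple[str, Dict[str, str], str]:
--     """Find common prefix and suffix, return (prefix, different_parts, suffix)."""
--     if not contexts:
--         return "", {}, ""
--
--     strings = list(contexts.values())
--     if len(strings) == 1:
--         return "", {list(contexts.keys())[0]: strings[0]}, ""
--
--     # Find common prefix
--     prefix = ""
--     for chars in zip(*strings):
--         if len(set(chars)) == 1:
--             prefix += chars[0]
--         else: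
--             break
--
--     # Find common suffix
--     suffix = ""
--     for chars in zip(*[s[::-1] for s in strings]):
--         if len(set(chars)) == 1:
--             suffix = chars[0] + suffix
--         else:
--             break
--
--     # Extract different parts
--     prefix_len = len(prefix)
--     suffix_len = len(suffix) if suffix else 0
--
--     different_parts = {}
--     for opt, text in contexts.items():
--         if suffix_len > 0:
--             different_parts[opt] = text[prefix_len:-suffix_len]
--         else:
--             different_parts[opt] = text[prefix_len:]
--
--     return prefix, different_parts, suffix
-- ===== SOURCE B (Python) =====
-- from typing import Dict
--
-- def _lcp(a: str, b: str) -> str: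
--     out = []
--     for x, y in zip(a, b):
--         if x != y:
--             break
--         out.append(x)
--     return "".join(out)
--
-- def find_common_parts(contexts: Dict[str, str]) -> tuple[str, Dict[str, str], str]:
--     """Find common prefix and suffix, return (prefix, different_parts, suffix)."""
--     if not contexts:
--         return "", {}, ""
--     items = list(contexts.items())
--     if len(items) == 1:
--         return "", {items[0][0]: items[0][1]}, ""
--     texts = [t for _, t in items]
--     pre = texts[0]
--     rev = texts[0][::-1]
--     for t in texts[1:]:
--         pre = _lcp(pre, t)
--         rev = _lcp(rev, t[::-1])
--     n, m = len(pre), len(rev)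
--     parts = {k: t[n:len(t) - m] for k, t in items}
--     return pre, parts, rev[::-1]
-- ===== Notes on version B (the rewrite author's own statement) =====
-- stated objective: simpler
-- what changed: B replaces A's two zip(*strings) column scans (building a set per column over all strings) with a single running pairwise longest-common-prefix fold over the texts (and their reversals), and replaces A's branching negative-index slice with one branch-free slice t[n:len(t)-m].
import Mathlib
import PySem

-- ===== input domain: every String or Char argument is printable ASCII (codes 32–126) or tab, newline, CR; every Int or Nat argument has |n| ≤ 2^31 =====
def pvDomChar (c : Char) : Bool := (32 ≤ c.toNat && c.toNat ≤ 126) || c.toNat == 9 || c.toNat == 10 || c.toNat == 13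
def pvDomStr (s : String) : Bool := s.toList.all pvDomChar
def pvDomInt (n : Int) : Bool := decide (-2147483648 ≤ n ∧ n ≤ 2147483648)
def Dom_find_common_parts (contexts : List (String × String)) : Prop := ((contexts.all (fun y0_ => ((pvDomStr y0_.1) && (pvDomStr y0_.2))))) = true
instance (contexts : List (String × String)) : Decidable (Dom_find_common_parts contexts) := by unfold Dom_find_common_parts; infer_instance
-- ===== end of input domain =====

-- B replaces A's column-by-column zip(*strings) scans with a running pairwise
-- longest-common-prefix fold and a single branch-free slice (same return value,
-- different decomposition).

-- ===== PORT A =====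

-- zip(*strings): hand port of the builtin for a list of argument lists; exact —
-- stops at the shortest list, empty for zero arguments.
def pvZipStar (ls : List (List Char)) : List (List Char) :=
  match ls with
  | [] => []
  | x :: rest =>
    if (x :: rest).any List.isEmpty then []
    else ((x :: rest).map (fun s => s.headD ' ')) :: pvZipStar ((x :: rest).map List.tail)
termination_by (ls.headD []).length
decreasing_by
  rename_i h
  cases x with
  | nil => simp at h
  | cons c cs => simp

-- len(set(chars)) == 1
def pvUniform (col : List Char) : Bool := (PySem.Set.ofList col).length == 1

-- A's prefix loop: append chars[0] while the column is uniform, break otherwise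
def pvPrefixLoop : List (List Char) → List Char
  | [] => []
  | col :: rest => if pvUniform col then col.headD ' ' :: pvPrefixLoop rest else []

-- A's suffix loop: suffix = chars[0] + suffix while uniform, break otherwise
def pvSuffixLoop : List (List Char) → List Char → List Char
  | [], acc => acc
  | col :: rest, acc => if pvUniform col then pvSuffixLoop rest (col.headD ' ' :: acc) else acc

def find_common_parts (contexts : List (String × String)) : String × (List (String × String)) × String :=
  if contexts.isEmpty then ("", [], "")
  else
    let strings := contexts.map (fun p => p.2)
    if strings.length == 1 then
      ("", [((contexts.map (fun p => p.1)).headD "", strings.headD "")], "")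
    else
      let sls := strings.map String.toList
      let pfx := pvPrefixLoop (pvZipStar sls)
      let sfx := pvSuffixLoop (pvZipStar (sls.map List.reverse)) []
      let prefixLen := pfx.length
      let suffixLen := sfx.length
      -- dict rebuilt over contexts.items(); a dict's keys are distinct, so it is the map
      let parts := contexts.map (fun p =>
        (p.1, if suffixLen > 0
          then String.ofList (PySem.List.slice p.2.toList (some (prefixLen : Int)) (some (-(suffixLen : Int))))
          else String.ofList (PySem.List.slice p.2.toList (some (prefixLen : Int)) none)))
      (String.ofList pfx, parts, String.ofList sfx)

-- ===== PORT B =====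

-- _lcp(a, b): the agreeing prefix of two strings, char by char
def pvLcp2 : List Char → List Char → List Char
  | a :: as, b :: bs => if a = b then a :: pvLcp2 as bs else []
  | _, _ => []

def find_common_parts_alt (contexts : List (String × String)) : String × (List (String × String)) × String :=
  if contexts.isEmpty then ("", [], "")
  else if contexts.length == 1 then
    ("", [((contexts.headD ("", "")).1, (contexts.headD ("", "")).2)], "")
  else
    let texts := contexts.map (fun p => p.2.toList)
    let init := texts.headD []
    let pr := texts.tail.foldl
      (fun acc t => (pvLcp2 acc.1 t, pvLcp2 acc.2 t.reverse)) (init, init.reverse)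
    let n := pr.1.length
    let m := pr.2.length
    (String.ofList pr.1,
     contexts.map (fun p =>
       (p.1, String.ofList (PySem.List.slice p.2.toList (some (n : Int))
               (some ((p.2.toList.length : Int) - (m : Int)))))),
     String.ofList pr.2.reverse)

-- ===== PRECONDITION & SPEC =====
def Spec_find_common_parts (contexts : List (String × String)) (out : String × (List (String × String)) × String) : Prop := out = find_common_parts_alt contexts
instance (contexts : List (String × String)) (out : String × (List (String × String)) × String) : Decidable (Spec_find_common_parts contexts out) := by unfold Spec_find_common_parts; infer_instance

-- ===== CLAIM (what is proved, stated in full; the proofs are below) =====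
def Claim_equal_find_common_parts : Prop := ∀ (contexts : List (String × String)), Dom_find_common_parts contexts → Spec_find_common_parts contexts (find_common_parts contexts)

-- ===== LEMMAS AND PROOFS =====

theorem pvLcp2_nil_left (b : List Char) : pvLcp2 [] b = [] := by cases b <;> rfl
theorem pvLcp2_nil_right (a : List Char) : pvLcp2 a [] = [] := by cases a <;> rfl

theorem foldl_lcp2_nil (t : List (List Char)) : t.foldl pvLcp2 [] = [] := by
  induction t with
  | nil => rfl
  | cons s t ih => simp [pvLcp2_nil_left, ih]

theorem foldl_lcp2_of_mem_nil (t : List (List Char)) (i : List Char) (h : [] ∈ t) :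
    t.foldl pvLcp2 i = [] := by
  induction t generalizing i with
  | nil => simp at h
  | cons s t ih =>
    rcases List.mem_cons.1 h with h1 | h1
    · subst h1; simp [pvLcp2_nil_right, foldl_lcp2_nil]
    · exact ih _ h1

def pvHeadIs (a : Char) (s : List Char) : Bool := !s.isEmpty && (s.headD ' ' == a)

theorem foldl_lcp2_cons (t : List (List Char)) (a : Char) (as : List Char) :
    t.foldl pvLcp2 (a :: as) =
      if t.all (pvHeadIs a) then a :: (t.map List.tail).foldl pvLcp2 as else [] := by
  induction t generalizing as with
  | nil => simp
  | cons s t ih =>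
    cases s with
    | nil =>
      simp [pvLcp2_nil_right, foldl_lcp2_nil, pvHeadIs]
    | cons b bs =>
      by_cases hab : a = b
      · subst hab
        rw [List.foldl_cons, show pvLcp2 (a :: as) (a :: bs) = a :: pvLcp2 as bs from by
          simp [pvLcp2], ih]
        simp [pvHeadIs]
      · simp [pvLcp2, hab, foldl_lcp2_nil, pvHeadIs, Ne.symm hab]

theorem set_foldl_add_len_le (t : List Char) (s : PySem.Set Char) :
    s.length ≤ (t.foldl PySem.Set.add s).length := by
  induction t generalizing s with
  | nil => simp
  | cons b t ih =>
    refine le_trans ?_ (ih (PySem.Set.add s b))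
    simp only [PySem.Set.add]
    split <;> simp

theorem foldl_add_singleton_len (l : List Char) (a : Char) :
    ((l.foldl PySem.Set.add [a]).length == 1) = l.all (fun b => b == a) := by
  induction l with
  | nil => rfl
  | cons b t ih =>
    by_cases hb : b = a
    · subst hb
      have hadd : PySem.Set.add [b] b = [b] := by simp [PySem.Set.add]
      simp only [List.foldl_cons, hadd, ih, List.all_cons, BEq.rfl, Bool.true_and]
    · have hadd : PySem.Set.add [a] b = [a, b] := by
        simp [PySem.Set.add]
        exact hb
      have h2 : 2 ≤ (t.foldl PySem.Set.add [a, b]).length := set_foldl_add_len_le t [a, b]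
      have h3 : ((t.foldl PySem.Set.add [a, b]).length == 1) = false := by
        simp; omega
      simp [h3, hb]

theorem uniform_cons (a : Char) (l : List Char) :
    pvUniform (a :: l) = l.all (fun b => b == a) := by
  have h1 : PySem.Set.ofList (a :: l) = l.foldl PySem.Set.add [a] := by
    simp [PySem.Set.ofList, PySem.Set.add, PySem.Set.empty]
  rw [pvUniform, h1, foldl_add_singleton_len]

theorem pvPrefixLoop_zipStar (h : List Char) (t : List (List Char)) :
    pvPrefixLoop (pvZipStar (h :: t)) = t.foldl pvLcp2 h := by
  induction h generalizing t with
  | nil =>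
    rw [pvZipStar]
    simp [foldl_lcp2_nil, pvPrefixLoop]
  | cons a as ih =>
    by_cases hc : ((a :: as) :: t).any List.isEmpty = true
    · rw [pvZipStar, if_pos hc]
      have hmem : [] ∈ t := by
        simp only [List.any_cons, List.isEmpty_cons, Bool.false_or, List.any_eq_true] at hc
        obtain ⟨s, hs, hse⟩ := hc
        rw [List.isEmpty_iff] at hse
        exact hse ▸ hs
      simp [pvPrefixLoop, foldl_lcp2_of_mem_nil t _ hmem]
    · rw [pvZipStar, if_neg hc]
      have hne : ∀ s ∈ t, s ≠ [] := by
        intro s hs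
        simp only [List.any_cons, List.isEmpty_cons, Bool.false_or, List.any_eq_true] at hc
        intro hnil
        exact hc ⟨s, hs, by simp [hnil]⟩
      simp only [List.map_cons, pvPrefixLoop]
      rw [uniform_cons]
      have hcond : ((t.map (fun s => s.headD ' ')).all (fun b => b == a)) = t.all (pvHeadIs a) := by
        apply Bool.eq_iff_iff.2
        simp only [List.all_map, List.all_eq_true, Function.comp]
        constructor
        · intro hall s hs
          simp only [pvHeadIs, Bool.and_eq_true]
          refine ⟨by simp [hne s hs], by simpa using hall s hs⟩
        · intro hall s hs
          have := hall s hs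
          simp only [pvHeadIs, Bool.and_eq_true] at this
          simpa using this.2
      simp only [List.headD_cons, List.tail_cons]
      rw [hcond, foldl_lcp2_cons]
      by_cases hall : t.all (pvHeadIs a) = true
      · have htail : ((a :: as) :: t).map List.tail = as :: t.map List.tail := by simp
        rw [hall]
        simp only [if_true, ih]
      · rw [Bool.not_eq_true] at hall
        simp [hall]

theorem pvSuffixLoop_eq (cols : List (List Char)) (acc : List Char) :
    pvSuffixLoop cols acc = (pvPrefixLoop cols).reverse ++ acc := by
  induction cols generalizing acc with
  | nil => simp [pvSuffixLoop, pvPrefixLoop]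
  | cons col rest ih =>
    by_cases hu : pvUniform col = true
    · simp [pvSuffixLoop, pvPrefixLoop, hu, ih]
    · rw [Bool.not_eq_true] at hu
      simp [pvSuffixLoop, pvPrefixLoop, hu]

theorem pvLcp2_len_le_left (a b : List Char) : (pvLcp2 a b).length ≤ a.length := by
  induction a generalizing b with
  | nil => simp [pvLcp2_nil_left]
  | cons x xs ih =>
    cases b with
    | nil => simp [pvLcp2_nil_right]
    | cons y ys =>
      by_cases hxy : x = y
      · simpa [pvLcp2, hxy] using ih ys
      · simp [pvLcp2, hxy]

theorem pvLcp2_len_le_right (a b : List Char) : (pvLcp2 a b).length ≤ b.length := by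
  induction a generalizing b with
  | nil => simp [pvLcp2_nil_left]
  | cons x xs ih =>
    cases b with
    | nil => simp [pvLcp2_nil_right]
    | cons y ys =>
      by_cases hxy : x = y
      · simpa [pvLcp2, hxy] using ih ys
      · simp [pvLcp2, hxy]

theorem foldl_lcp2_len_le_init (t : List (List Char)) (i : List Char) :
    (t.foldl pvLcp2 i).length ≤ i.length := by
  induction t generalizing i with
  | nil => simp
  | cons s t ih => exact le_trans (ih (pvLcp2 i s)) (pvLcp2_len_le_left i s)

theorem foldl_lcp2_len_le_mem (t : List (List Char)) (i s : List Char) (h : s ∈ i :: t) :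
    (t.foldl pvLcp2 i).length ≤ s.length := by
  rcases List.mem_cons.1 h with h1 | h1
  · exact h1 ▸ foldl_lcp2_len_le_init t i
  · induction t generalizing i with
    | nil => simp at h1
    | cons u t ih =>
      rcases List.mem_cons.1 h1 with h2 | h2
      · subst h2
        exact le_trans (foldl_lcp2_len_le_init t (pvLcp2 i s)) (pvLcp2_len_le_right i s)
      · exact ih (pvLcp2 i u) (List.mem_cons_of_mem _ h2) h2

theorem slice_neg_eq_slice_sub (l : List Char) (n m : Nat) (hm : m ≤ l.length) (hmpos : 0 < m) :
    PySem.List.slice l (some (n : Int)) (some (-(m : Int))) =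
      PySem.List.slice l (some (n : Int)) (some ((l.length : Int) - (m : Int))) := by
  have hclamp : PySem.List.clampIdx l.length (-(m : Int)) =
      PySem.List.clampIdx l.length ((l.length : Int) - (m : Int)) := by
    simp only [PySem.List.clampIdx]
    split_ifs <;> omega
  simp only [PySem.List.slice, hclamp]

theorem slice_none_eq_slice_len (l : List Char) (n : Nat) :
    PySem.List.slice l (some (n : Int)) none =
      PySem.List.slice l (some (n : Int)) (some ((l.length : Int))) := by
  have : PySem.List.clampIdx l.length ((l.length : Int)) = l.length := by
    simp [PySem.List.clampIdx]
  simp only [PySem.List.slice, this]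

theorem part_eq (l : List Char) (n m : Nat) (hm : m ≤ l.length) :
    (if m > 0
      then String.ofList (PySem.List.slice l (some (n : Int)) (some (-(m : Int))))
      else String.ofList (PySem.List.slice l (some (n : Int)) none)) =
    String.ofList (PySem.List.slice l (some (n : Int)) (some ((l.length : Int) - (m : Int)))) := by
  by_cases hpos : 0 < m
  · rw [if_pos hpos, slice_neg_eq_slice_sub l n m hm hpos]
  · have h0 : m = 0 := by omega
    subst h0
    rw [if_neg hpos, slice_none_eq_slice_len]
    simp

theorem foldl_lcp2_pair (l : List (List Char)) (a b : List Char) :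
    l.foldl (fun acc t => (pvLcp2 acc.1 t, pvLcp2 acc.2 t.reverse)) (a, b) =
      (l.foldl pvLcp2 a, l.foldl (fun acc t => pvLcp2 acc t.reverse) b) :=
  PySem.List.foldl_prod_mk pvLcp2 (fun acc t => pvLcp2 acc t.reverse) l a b

theorem main_case (p q : String × String) (rest : List (String × String)) :
    find_common_parts (p :: q :: rest) = find_common_parts_alt (p :: q :: rest) := by
  have hlen1 : ((p :: q :: rest).length == 1) = false := by simp
  have hs1 : ((p.2 :: q.2 :: List.map (fun x => x.2) rest).length == 1) = false := by simp
  have hsuf : pvSuffixLoop (pvZipStar (p.2.toList.reverse ::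
      q.2.toList.reverse :: rest.map (fun x => x.2.toList.reverse))) [] =
      ((rest.map (fun x => x.2.toList)).foldl (fun acc t => pvLcp2 acc t.reverse)
        (pvLcp2 p.2.toList.reverse q.2.toList.reverse)).reverse := by
    have h2 : q.2.toList.reverse :: List.map (fun x => x.2.toList.reverse) rest =
        (q.2.toList :: List.map (fun x => x.2.toList) rest).map List.reverse := by simp
    rw [pvSuffixLoop_eq, List.append_nil, h2, pvPrefixLoop_zipStar, List.foldl_map,
      List.foldl_cons]
  -- the common suffix length is at most each text's length
  have hm : ∀ x ∈ p :: q :: rest,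
      ((rest.map (fun r => r.2.toList)).foldl (fun acc t => pvLcp2 acc t.reverse)
        (pvLcp2 p.2.toList.reverse q.2.toList.reverse)).length ≤ x.2.toList.length := by
    intro x hx
    have hmem : x.2.toList.reverse ∈
        p.2.toList.reverse :: (q.2.toList :: rest.map (fun r => r.2.toList)).map List.reverse := by
      rcases List.mem_cons.1 hx with h1 | h1
      · subst h1; exact List.mem_cons_self
      · refine List.mem_cons_of_mem _ (List.mem_map.2 ⟨x.2.toList, ?_, rfl⟩)
        rcases List.mem_cons.1 h1 with h2 | h2
        · subst h2; exact List.mem_cons_self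
        · exact List.mem_cons_of_mem _ (List.mem_map.2 ⟨x, h2, rfl⟩)
    have hb := foldl_lcp2_len_le_mem ((q.2.toList :: rest.map (fun r => r.2.toList)).map List.reverse)
      p.2.toList.reverse x.2.toList.reverse hmem
    rw [List.foldl_map, List.foldl_cons] at hb
    simpa using hb
  simp only [find_common_parts, find_common_parts_alt, List.isEmpty_cons, Bool.false_eq_true,
    if_false, hlen1, hs1, List.map_map, List.map_cons, List.tail_cons,
    List.headD_cons, Function.comp_def]
  rw [pvPrefixLoop_zipStar p.2.toList (q.2.toList :: rest.map (fun x => x.2.toList)), hsuf]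
  simp only [List.foldl_cons, foldl_lcp2_pair]
  simp only [List.length_reverse]
  simp only [Prod.mk.injEq]
  refine ⟨trivial, ?_, trivial⟩
  refine congrArg₂ List.cons ?_ (congrArg₂ List.cons ?_ ?_)
  · exact congrArg (Prod.mk p.1) (part_eq _ _ _ (hm p (by simp)))
  · exact congrArg (Prod.mk q.1) (part_eq _ _ _ (hm q (by simp)))
  · apply List.map_congr_left
    intro x hx
    exact congrArg (Prod.mk x.1)
      (part_eq _ _ _ (hm x (List.mem_cons_of_mem _ (List.mem_cons_of_mem _ hx))))

-- ===== VERDICT (by name: the statement is the Claim_ definition above) =====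
theorem find_common_parts_spec : Claim_equal_find_common_parts := by
  intro contexts _hdom
  unfold Spec_find_common_parts
  match contexts with
  | [] => rfl
  | [(k, v)] => rfl
  | p :: q :: rest => exact main_case p q rest
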